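-- pv_equiv track=rewrite | github.com/whodatboiii/sustainable_logistics | DSL_PS_3_TSP_LP.py | extract_tours
-- ===== SOURCE A (Python) =====
-- def extract_tours(solution, n):
--     node = 0
--     tours = [[0]]
--     all_nodes = [0] + [1] * (n - 1)
--
--     while sum(all_nodes) > 0:
--         for i in range(n):
--             if solution[node][i] == 1:
--                 next_node = i
--                 break
--
--         if next_node not in tours[-1]:
--             tours[-1].append(next_node)
--             node = next_node
--         else:
--             node = all_nodes.index(1)
--             tours.append([node])
--
--         all_nodes[node] = 0
--
--     return tours
-- ===== SOURCE B (Python) =====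
-- def extract_tours(solution, n):
--     # Recursive peel/walk decomposition: each tour is grown by a recursive walk
--     # that follows row.index(1); the sorted list of still-unvisited nodes is
--     # threaded through and filtered, so its head is always the next tour's start.
--     def walk(tour, remaining):
--         if not remaining:
--             return tour, remaining
--         nxt = solution[tour[-1]].index(1)
--         if nxt in tour:
--             return tour, remaining
--         return walk(tour + [nxt], [r for r in remaining if r != nxt])
--
--     def peel(start, remaining):
--         tour, rest = walk([start], remaining)
--         if not rest:
--             return [tour]
--         return [tour] + peel(rest[0], rest[1:])
--
--     return peel(0, list(range(1, n)))
-- ===== Notes on version B (the rewrite author's own statement) =====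
-- stated objective: alternative
-- what changed: B is a recursive peel/walk decomposition: a recursive walk grows one tour via row.index(1) while filtering a sorted list of unvisited nodes, and a recursive peel starts the next tour at that list's head; A instead runs one flat while-loop over a 0/1 flag array, recomputing sum(all_nodes) and all_nodes.index(1) and rescanning the row with an inner for/break.
-- outside the precondition, e.g. on extract_tours([[0, 1], []], 2): A returns [[0, 1]], B returns [[0, 1]]; on extract_tours([[1], [0, 0, 0]], 3): A returns [[0], [1, 0], [2]], B raises ValueError
import Mathlib
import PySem

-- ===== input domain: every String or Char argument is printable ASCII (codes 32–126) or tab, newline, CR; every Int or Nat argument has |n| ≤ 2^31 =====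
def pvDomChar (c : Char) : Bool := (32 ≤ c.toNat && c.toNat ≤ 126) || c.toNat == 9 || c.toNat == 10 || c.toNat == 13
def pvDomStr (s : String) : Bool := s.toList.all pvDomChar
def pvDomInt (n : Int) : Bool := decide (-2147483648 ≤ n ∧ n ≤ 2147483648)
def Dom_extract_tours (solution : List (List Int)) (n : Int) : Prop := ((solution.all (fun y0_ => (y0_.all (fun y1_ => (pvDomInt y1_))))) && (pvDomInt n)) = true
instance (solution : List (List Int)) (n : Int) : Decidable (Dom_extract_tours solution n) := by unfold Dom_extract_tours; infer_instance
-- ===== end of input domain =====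

-- B replaces A's flat while-loop over a 0/1 flag array (with its per-step sum(), index() and
-- row rescan) by a recursive peel/walk decomposition threading a sorted list of unvisited
-- nodes; return values are proved equal on Pre_ (each of the first n rows carries a 1 the
-- scan reaches).

-- ===== PORT A =====
-- A's inner `for i in range(n): if solution[node][i] == 1: … break`; outer none models the
-- IndexError (missing index); `some none` is the loop completing without a break (next_node
-- keeps its previous value, threaded as nextVar below); both only reachable outside Pre_.
def pvScanRow (row : List Int) (js : List Int) : Option (Option Int) :=
  match js with
  | [] => some none
  | j :: rest =>
    match PySem.List.pyGet? row j with
    | none => none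
    | some v => if v == 1 then some (some j) else pvScanRow row rest

-- A's while-loop; fuel bounds the iteration count (ample on every Pre_ input; on exhaustion the
-- tours built so far are returned, which never happens under Pre_).
def extract_toursGo (solution : List (List Int)) (n : Int) (node : Int)
    (tours : List (List Int)) (allNodes : List Int) (nextVar : Option Int) :
    Nat → List (List Int)
  | 0 => tours
  | fuel + 1 =>
    if allNodes.sum > 0 then
      match pvScanRow ((PySem.List.pyGet? solution node).getD []) (PySem.List.pyRange 0 n 1) with
      | none => tours   -- Python raises IndexError here (excluded by Pre_)
      | some found =>
      match (match found with | some j => some j | none => nextVar) with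
      | none => tours   -- Python raises NameError here (next_node never assigned; outside Pre_)
      | some nextNode =>
        let lastT := tours.getLast?.getD []
        if nextNode ∉ lastT then
          extract_toursGo solution n nextNode (tours.dropLast ++ [lastT ++ [nextNode]])
            (allNodes.set nextNode.toNat 0) (some nextNode) fuel
        else
          let node' : Int := ((PySem.List.index? allNodes 1).getD 0 : Nat)
          extract_toursGo solution n node' (tours ++ [[node']])
            (allNodes.set node'.toNat 0) (some nextNode) fuel
    else tours

def extract_tours (solution : List (List Int)) (n : Int) : List (List Int) :=
  extract_toursGo solution n 0 [[0]] (0 :: List.replicate (n - 1).toNat 1) none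
    ((n.toNat + 1) * (n.toNat + 1))

-- ===== PORT B =====
-- B's recursive walk: grows the current tour with solution[tour[-1]].index(1) until that
-- successor is already in the tour (or no unvisited node is left), filtering the visited node
-- out of `remaining`. The .getD defaults model the ValueError/IndexError cases excluded by Pre_.
def pvWalkGo (solution : List (List Int)) (tour : List Int) (remaining : List Int) :
    Nat → List Int × List Int
  | 0 => (tour, remaining)
  | fuel + 1 =>
    if remaining = [] then (tour, remaining)
    else
      let row := (PySem.List.pyGet? solution (PySem.List.pyGetD tour (-1) 0)).getD []
      let nxt : Int := ((PySem.List.index? row 1).getD 0 : Nat)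
      if nxt ∈ tour then (tour, remaining)
      else pvWalkGo solution (tour ++ [nxt]) (remaining.filter (fun r => r != nxt)) fuel

-- B's recursive peel: one walk per tour, the next tour starting at the head of the sorted
-- remaining list.
def pvPeelGo (solution : List (List Int)) (wf : Nat) (start : Int) (remaining : List Int) :
    Nat → List (List Int)
  | 0 => [[start]]
  | fuel + 1 =>
    let p := pvWalkGo solution [start] remaining wf
    if p.2 = [] then [p.1] else p.1 :: pvPeelGo solution wf (p.2.headD 0) p.2.tail fuel

def extract_tours_alt (solution : List (List Int)) (n : Int) : List (List Int) :=
  pvPeelGo solution (n.toNat + 1) 0 (PySem.List.pyRange 1 n 1) (n.toNat + 1)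

-- ===== PRECONDITION & SPEC =====
-- Pre_ excludes inputs where some of the first n rows is missing or lacks a 1 among its first
-- n (and existing) columns: there A raises NameError/IndexError on the first defective scan or
-- silently reuses a stale next_node on later ones, and B raises ValueError/IndexError; this is
-- slightly narrower than A's exact domain (A never scans the row of the node visited last, so
-- it can return on a matrix whose last-visited row is defective).
def Pre_extract_tours (solution : List (List Int)) (n : Int) : Prop :=
  n ≤ 1 ∨ (n ≤ solution.length ∧ ∀ i < n.toNat, ∃ j < n.toNat,
    j < (solution.getD i []).length ∧ (solution.getD i []).getD j 0 = 1)
instance (solution : List (List Int)) (n : Int) : Decidable (Pre_extract_tours solution n) := by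
  unfold Pre_extract_tours; infer_instance

def pvWitness_extract_tours : List (List Int) × Int := ([[0, 1], [1, 0]], 2)

def Spec_extract_tours (solution : List (List Int)) (n : Int) (out : List (List Int)) : Prop := out = extract_tours_alt solution n
instance (solution : List (List Int)) (n : Int) (out : List (List Int)) : Decidable (Spec_extract_tours solution n out) := by unfold Spec_extract_tours; infer_instance

-- ===== CLAIM (what is proved, stated in full; the proofs are below) =====
def Claim_equal_extract_tours : Prop := ∀ (solution : List (List Int)) (n : Int), Dom_extract_tours solution n → Pre_extract_tours solution n → Spec_extract_tours solution n (extract_tours solution n)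

-- ===== LEMMAS AND PROOFS =====

-- A's all_nodes flag list, expressed from the list `rem` of still-unvisited nodes.
def pvInd (m : Nat) (rem : List Int) : List Int :=
  (List.range m).map (fun i : Nat => if (i : Int) ∈ rem then (1 : Int) else 0)

theorem pv_ind_length (m : Nat) (rem : List Int) : (pvInd m rem).length = m := by
  simp [pvInd]

theorem pv_ind_getElem (m : Nat) (rem : List Int) (i : Nat) (hk : i < (pvInd m rem).length) :
    (pvInd m rem)[i] = if (i : Int) ∈ rem then 1 else 0 := by
  simp only [pvInd, List.getElem_map, List.getElem_range]

theorem pv_ind_getD (m : Nat) (rem : List Int) (i : Nat) (hi : i < m) :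
    (pvInd m rem).getD i 0 = if (i : Int) ∈ rem then 1 else 0 := by
  rw [List.getD_eq_getElem _ _ (by rw [pv_ind_length]; omega), pv_ind_getElem]

theorem pv_nodup_len (l : List Int) (m : Nat) (hnd : l.Nodup)
    (hb : ∀ x ∈ l, 0 ≤ x ∧ x < (m : Int)) : l.length ≤ m := by
  have h1 : l.toFinset.card = l.length := List.toFinset_card_of_nodup hnd
  have h2 : l.toFinset ⊆ Finset.Icc (0 : Int) (m - 1) := by
    intro x hx
    simp only [List.mem_toFinset] at hx
    have := hb x hx
    simp [Finset.mem_Icc]; omega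
  have h3 := Finset.card_le_card h2
  rw [h1] at h3
  have h4 : (Finset.Icc (0 : Int) (m - 1)).card = m := by
    rw [Int.card_Icc]; omega
  omega

theorem pv_sum_ind_pos (m : Nat) (h : Int) (t : List Int) (h0 : 0 ≤ h) (hm : h < (m : Int)) :
    0 < (pvInd m (h :: t)).sum := by
  have hc : ((h.toNat : Nat) : Int) = h := Int.toNat_of_nonneg h0
  have hmem : (1 : Int) ∈ pvInd m (h :: t) :=
    List.mem_map.mpr ⟨h.toNat, List.mem_range.mpr (by omega), by simp [hc]⟩
  have hle := List.single_le_sum (l := pvInd m (h :: t)) (fun x hx => by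
    obtain ⟨i, _, hi⟩ := List.mem_map.mp hx
    split at hi <;> omega) 1 hmem
  omega

theorem pv_ind_set (m : Nat) (rem : List Int) (k : Nat) (hk : k < m) :
    (pvInd m rem).set k 0 = pvInd m (rem.filter (fun r => r != (k : Int))) := by
  apply List.ext_getElem
  · simp [pv_ind_length]
  · intro i hi1 hi2
    have him : i < m := by rw [List.length_set, pv_ind_length] at hi1; exact hi1
    rw [List.getElem_set, pv_ind_getElem, pv_ind_getElem]
    by_cases hik : k = i
    · subst hik
      simp [List.mem_filter]
    · have hne : (i : Int) ≠ (k : Int) := by omega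
      simp [hik, List.mem_filter, hne]

theorem pv_index?_of_min (v : Int) : ∀ (row : List Int) (k : Nat), k < row.length →
    row.getD k 0 = v → (∀ j < k, row.getD j 0 ≠ v) →
    PySem.List.index? row v = some k := by
  intro row
  induction row with
  | nil => intro k hk; simp at hk
  | cons x xs ih =>
    intro k hk hv hmin
    cases k with
    | zero =>
      simp at hv; subst hv
      exact PySem.List.index?_cons_self x xs
    | succ k' =>
      have hx : x ≠ v := by have := hmin 0 (by omega); simpa using this
      rw [PySem.List.index?_cons_of_ne _ hx]
      rw [ih k' (by simpa using hk) (by simpa using hv)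
        (fun j hj => by have := hmin (j+1) (by omega); simpa using this)]
      rfl

-- A's row scan lands on the least index carrying a 1 in [a, n).
theorem pv_scan_min (row : List Int) :
    ∀ (m : Nat) (a n : Int), (n - a).toNat = m → 0 ≤ a →
    (∃ j : Nat, a ≤ (j : Int) ∧ (j : Int) < n ∧ j < row.length ∧ row.getD j 0 = 1) →
    ∃ k : Nat, a ≤ (k : Int) ∧ (k : Int) < n ∧ k < row.length ∧ row.getD k 0 = 1 ∧
      (∀ j : Nat, a ≤ (j : Int) → j < k → row.getD j 0 ≠ 1) ∧
      pvScanRow row (PySem.List.pyRange a n 1) = some (some (k : Int)) := by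
  intro m
  induction m with
  | zero =>
    intro a n hm ha ⟨j, hj1, hj2, _, _⟩
    exfalso; omega
  | succ m ih =>
    intro a n hm ha hex
    obtain ⟨j, hj1, hj2, hjlen, hjval⟩ := hex
    have han : a < n := by omega
    rw [PySem.List.pyRange_one_cons han]
    have halen : a.toNat < row.length := by omega
    have hget : PySem.List.pyGet? row a = some row[a.toNat] :=
      PySem.List.pyGet?_eq_some_getElem row ha (by omega)
    by_cases hv : row[a.toNat] = 1
    · refine ⟨a.toNat, by omega, by omega, halen, ?_, ?_, ?_⟩
      · rw [List.getD_eq_getElem _ _ halen]; exact hv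
      · intro j hj1 hj2; omega
      · simp [pvScanRow, hget, hv, Int.toNat_of_nonneg ha]
    · have hne : j ≠ a.toNat := by
        intro h; subst h
        rw [List.getD_eq_getElem _ _ hjlen] at hjval
        exact hv hjval
      have hex2 : ∃ j : Nat, a + 1 ≤ (j : Int) ∧ (j : Int) < n ∧ j < row.length ∧
          row.getD j 0 = 1 := ⟨j, by omega, hj2, hjlen, hjval⟩
      obtain ⟨k, hk1, hk2, hklen, hkval, hkmin, hks⟩ := ih (a + 1) n (by omega) (by omega) hex2
      refine ⟨k, by omega, hk2, hklen, hkval, ?_, ?_⟩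
      · intro j hja hjk
        by_cases hja2 : (j : Int) = a
        · have : j = a.toNat := by omega
          subst this
          rw [List.getD_eq_getElem _ _ halen]
          exact hv
        · exact hkmin j (by omega) hjk
      · have hb : (row[a.toNat] == 1) = false := by simp [hv]
        simp only [pvScanRow, hget]
        simp [hb, hks]

-- the bisimulation between A's flat loop state and B's walk/peel recursion
theorem pv_main (solution : List (List Int)) (n : Int) (hlen : n ≤ solution.length)
    (hrows : ∀ i < n.toNat, ∃ j < n.toNat,
      j < (solution.getD i []).length ∧ (solution.getD i []).getD j 0 = 1) :
    ∀ (afuel : Nat) (wf pf : Nat) (node : Int) (nv : Option Int) (tour rem : List Int)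
      (done : List (List Int)),
      tour ≠ [] → tour.Nodup → (∀ x ∈ tour, 0 ≤ x ∧ x < n) →
      rem.Pairwise (· < ·) → (∀ x ∈ rem, 0 ≤ x ∧ x < n) →
      tour.getLast?.getD 0 = node →
      (n.toNat + 1) * rem.length + (n.toNat - tour.length) < afuel →
      n.toNat - tour.length < wf → rem.length ≤ pf →
      extract_toursGo solution n node (done ++ [tour]) (pvInd n.toNat rem) nv afuel
        = done ++ (let p := pvWalkGo solution tour rem wf;
                   if p.2 = [] then [p.1]
                   else p.1 :: pvPeelGo solution (n.toNat + 1) (p.2.headD 0) p.2.tail pf) := by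
  intro afuel
  induction afuel with
  | zero =>
    intro wf pf node nv tour rem done _ _ _ _ _ _ ha _ _
    omega
  | succ af ih =>
    intro wf pf node nv tour rem done htne hnd htb hrp hrb hnode ha hw hp
    obtain ⟨w, rfl⟩ : ∃ w, wf = w + 1 := ⟨wf - 1, by omega⟩
    rw [extract_toursGo]
    -- node is the last element of tour, hence in bounds
    have hnmem : node ∈ tour := by
      rcases List.getLast?_isSome.mpr htne |> Option.isSome_iff_exists.mp with ⟨x, hx⟩
      rw [hx] at hnode
      simp at hnode
      subst hnode
      exact List.mem_of_getLast? hx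
    have hnb := htb node hnmem
    cases rem with
    | nil =>
      have hsum : ¬ (pvInd n.toNat []).sum > 0 := by simp [pvInd]
      rw [if_neg hsum]
      simp [pvWalkGo]
    | cons h t =>
      have hhb := hrb h (by simp)
      have hsum : (pvInd n.toNat (h :: t)).sum > 0 :=
        pv_sum_ind_pos _ h t hhb.1 (by omega)
      rw [if_pos hsum]
      -- the scanned row
      have hnlen : node.toNat < solution.length := by omega
      have hrowD : solution.getD node.toNat [] = solution[node.toNat] :=
        List.getD_eq_getElem _ _ hnlen
      obtain ⟨j, hjn, hjlen, hjval⟩ := hrows node.toNat (by omega)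
      rw [hrowD] at hjlen hjval
      obtain ⟨k, hk0, hkn, hklen, hkval, hkmin, hks⟩ :=
        pv_scan_min solution[node.toNat] n.toNat 0 n (by omega) le_rfl
          ⟨j, by omega, by omega, hjlen, hjval⟩
      have hget : PySem.List.pyGet? solution node = some solution[node.toNat] :=
        PySem.List.pyGet?_eq_some_getElem solution hnb.1 (by omega)
      have hidx : PySem.List.index? solution[node.toNat] 1 = some k :=
        pv_index?_of_min 1 _ k hklen hkval (fun j hj => hkmin j (by omega) hj)
      -- B's row is the same row
      have hBnode : PySem.List.pyGetD tour (-1) 0 = node := by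
        rw [PySem.List.pyGetD_neg_one tour 0 htne]
        rw [List.getLast?_eq_some_getLast htne] at hnode
        simpa using hnode
      have hlast : (done ++ [tour]).getLast?.getD [] = tour := by
        rw [List.getLast?_concat]; rfl
      rw [hget]
      simp only [Option.getD_some, hks, hlast]
      by_cases hmem : ((k : Nat) : Int) ∈ tour
      · -- tour closes: new tour at the head of rem
        rw [if_neg (by simpa using hmem)]
        have hht : ∀ x ∈ t, h < x := (List.pairwise_cons.mp hrp).1
        have hAidx : PySem.List.index? (pvInd n.toNat (h :: t)) 1 = some h.toNat := by
          apply pv_index?_of_min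
          · rw [pv_ind_length]; omega
          · rw [pv_ind_getD _ _ _ (by omega)]
            simp [Int.toNat_of_nonneg hhb.1]
          · intro j hj
            rw [pv_ind_getD _ _ _ (by omega)]
            have hni : (j : Int) ∉ h :: t := by
              simp only [List.mem_cons, not_or]
              refine ⟨by omega, fun hmemt => ?_⟩
              have := hht _ hmemt
              omega
            simp [hni]
        rw [hAidx]
        have hc : ((h.toNat : Nat) : Int) = h := Int.toNat_of_nonneg hhb.1
        simp only [Option.getD_some, hc]
        -- A's flags update: drop h from rem
        have hset : (pvInd n.toNat (h :: t)).set h.toNat 0 = pvInd n.toNat t := by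
          rw [show h.toNat = ((h.toNat : Nat) : Int).toNat by omega]
          rw [pv_ind_set _ _ _ (by omega)]
          simp only [hc]
          congr 1
          rw [List.filter_cons]
          simp only [bne_self_eq_false, Bool.false_eq_true, if_false]
          apply List.filter_eq_self.mpr
          intro x hx
          simpa using (ne_of_gt (hht x hx))
        rw [hset]
        -- B closes the walk and peels the next tour
        have hwalk : pvWalkGo solution tour (h :: t) (w + 1) = (tour, h :: t) := by
          rw [pvWalkGo]
          rw [if_neg (by simp)]
          simp only [hBnode, hget, Option.getD_some, hidx]
          rw [if_pos (by simpa using hmem)]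
        obtain ⟨p2, rfl⟩ : ∃ p2, pf = p2 + 1 := ⟨pf - 1, by simp at hp; omega⟩
        simp only [hwalk]
        rw [if_neg (by simp)]
        simp only [List.headD_cons, List.tail_cons]
        rw [pvPeelGo]
        have hmul : (n.toNat + 1) * (t.length + 1)
            = (n.toNat + 1) * t.length + (n.toNat + 1) := by ring
        have key := ih (n.toNat + 1) p2 h (some ((k : Nat) : Int)) [h] t (done ++ [tour])
          (by simp) (by simp)
          (by intro x hx; simp at hx; subst hx; exact ⟨hhb.1, by omega⟩)
          (List.pairwise_cons.mp hrp).2 (fun x hx => hrb x (by simp [hx]))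
          (by simp)
          (by rw [List.length_cons, hmul] at ha
              simp only [List.length_cons, List.length_nil]
              omega)
          (by simp only [List.length_cons, List.length_nil]; omega)
          (by simp only [List.length_cons] at hp; omega)
        rw [key]
        simp [List.append_assoc]
      · -- tour grows by k
        rw [if_pos (by simpa using hmem)]
        have hdrop : (done ++ [tour]).dropLast ++ [tour ++ [((k : Nat) : Int)]]
            = done ++ [tour ++ [((k : Nat) : Int)]] := by
          rw [List.dropLast_concat]
        rw [hdrop]
        have hset : (pvInd n.toNat (h :: t)).set ((k : Nat) : Int).toNat 0
            = pvInd n.toNat ((h :: t).filter (fun r => r != ((k : Nat) : Int))) := by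
          rw [show (((k : Nat) : Int)).toNat = k by omega]
          exact pv_ind_set _ _ _ (by omega)
        rw [hset]
        have hwalk : pvWalkGo solution tour (h :: t) (w + 1)
            = pvWalkGo solution (tour ++ [((k : Nat) : Int)])
                ((h :: t).filter (fun r => r != ((k : Nat) : Int))) w := by
          rw [pvWalkGo]
          rw [if_neg (by simp)]
          simp only [hBnode, hget, Option.getD_some, hidx]
          rw [if_neg (by simpa using hmem)]
        have hnd2 : (tour ++ [((k : Nat) : Int)]).Nodup := by
          rw [← List.concat_eq_append, List.nodup_concat]
          exact ⟨hmem, hnd⟩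
        have hb2 : ∀ x ∈ tour ++ [((k : Nat) : Int)], 0 ≤ x ∧ x < n := by
          intro x hx
          rcases List.mem_append.mp hx with hx | hx
          · exact htb x hx
          · simp at hx; subst hx; exact ⟨by positivity, by omega⟩
        have htlen : tour.length + 1 ≤ n.toNat := by
          have hlen2 : (tour ++ [((k : Nat) : Int)]).length ≤ n.toNat := by
            apply pv_nodup_len _ _ hnd2
            intro x hx
            have := hb2 x hx
            exact ⟨this.1, by omega⟩
          simpa using hlen2
        have hflen : ((h :: t).filter (fun r => r != ((k : Nat) : Int))).length
            ≤ (h :: t).length := List.length_filter_le _ _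
        have hmono : (n.toNat + 1) * ((h :: t).filter (fun r => r != ((k : Nat) : Int))).length
            ≤ (n.toNat + 1) * (h :: t).length := Nat.mul_le_mul_left _ hflen
        have key := ih w pf ((k : Nat) : Int) (some ((k : Nat) : Int)) (tour ++ [((k : Nat) : Int)])
          ((h :: t).filter (fun r => r != ((k : Nat) : Int))) done
          (by simp) hnd2 hb2
          (List.Pairwise.sublist List.filter_sublist hrp)
          (fun x hx => hrb x (List.mem_of_mem_filter hx))
          (by rw [List.getLast?_concat]; rfl)
          (by simp only [List.length_append, List.length_cons, List.length_nil] at *; omega)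
          (by simp only [List.length_append, List.length_cons, List.length_nil]; omega)
          (le_trans hflen hp)
        rw [key, hwalk]

-- ===== VERDICT (by name: the statement is the Claim_ definition above) =====
-- initial flag list of A is pvInd of the initial remaining list of B
theorem pv_init (n : Int) (hn : 1 ≤ n) :
    pvInd n.toNat (PySem.List.pyRange 1 n 1) = 0 :: List.replicate (n - 1).toNat 1 := by
  apply List.ext_getElem
  · simp only [pv_ind_length, List.length_cons, List.length_replicate]
    omega
  · intro i hi1 hi2
    have him : i < n.toNat := by rw [pv_ind_length] at hi1; exact hi1
    rw [pv_ind_getElem]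
    cases i with
    | zero =>
      rw [List.getElem_cons_zero, if_neg]
      rw [PySem.List.mem_pyRange_one]
      omega
    | succ i2 =>
      rw [List.getElem_cons_succ, List.getElem_replicate, if_pos]
      rw [PySem.List.mem_pyRange_one]
      constructor <;> omega

theorem extract_tours_spec : Claim_equal_extract_tours := by
  intro solution n _ hpre
  unfold Spec_extract_tours extract_tours extract_tours_alt
  by_cases hn1 : n ≤ 1
  · -- at most node 0 exists: both sides return [[0]]
    have h0 : (n - 1).toNat = 0 := by omega
    rw [h0, PySem.List.pyRange_one_eq_nil hn1]
    have hpos : 0 < (n.toNat + 1) * (n.toNat + 1) := Nat.mul_pos (by omega) (by omega)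
    obtain ⟨f, hf⟩ : ∃ f, (n.toNat + 1) * (n.toNat + 1) = f + 1 :=
      ⟨(n.toNat + 1) * (n.toNat + 1) - 1, by omega⟩
    rw [hf, extract_toursGo]
    norm_num
    rw [pvPeelGo]
    simp [pvWalkGo]
  · rcases hpre with h | ⟨hlen, hrows⟩
    · omega
    have hn2 : 2 ≤ n := by omega
    have hrlen : (PySem.List.pyRange 1 n 1).length = n.toNat - 1 := by
      rw [PySem.List.length_pyRange_one]; omega
    have e1 : (n.toNat + 1) * ((n.toNat - 1) + 1)
        = (n.toNat + 1) * (n.toNat - 1) + (n.toNat + 1) := by ring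
    have e2 : (n.toNat + 1) * ((n.toNat - 1) + 1) ≤ (n.toNat + 1) * (n.toNat + 1) :=
      Nat.mul_le_mul_left _ (by omega)
    have hmain := pv_main solution n hlen hrows ((n.toNat + 1) * (n.toNat + 1))
      (n.toNat + 1) n.toNat 0 none [0] (PySem.List.pyRange 1 n 1) []
      (by simp) (by simp)
      (by intro x hx; simp at hx; subst hx; exact ⟨le_rfl, by omega⟩)
      (PySem.List.pairwise_lt_pyRange_one 1 n)
      (fun x hx => by rw [PySem.List.mem_pyRange_one] at hx; exact ⟨by omega, hx.2⟩)
      (by simp)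
      (by rw [hrlen]; simp only [List.length_cons, List.length_nil]; omega)
      (by simp only [List.length_cons, List.length_nil]; omega)
      (by rw [hrlen]; omega)
    rw [pv_init n (by omega)] at hmain
    simp only [List.nil_append] at hmain
    rw [hmain, pvPeelGo]
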